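-- pv_equiv track=rewrite | github.com/Mome/falten | unicode_falts.py | process_one_block
-- ===== SOURCE A (Python) =====
-- bottom_left = '╰' #'└'
--
-- top_right = '╮' #'┐'
--
-- horizontal = '─'
--
-- vertical = '│'
--
-- bottom_right = '╯' #'┘'
--
-- top_left = '╭' #'┌'
--
-- def process_one_block(s):
--     s = s.replace('.','')
--     if s == '|':
--         return [vertical], [vertical]
--     if len(s) % 2 != 0:
--         raise Exception('Not even: ' + s)
--     s = s.replace('|', vertical)
--     s = s.replace('(', top_left)
--     s = s.replace(')', top_right)
--
--     layers = []
--     construct_layers(s, layers)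
--     correct_layers(layers)
--     layers = [''.join(l) for l in layers]
--
--     hl = len(s) // 2
--     bottom = [
--         vertical * (hl - i - 1) +
--         bottom_left +
--         horizontal * (2 * i) +
--         bottom_right +
--         vertical * (hl - i - 1)
--         for i in range(hl)
--     ]
--     return layers, bottom
--
-- def correct_layers(layers):
--     for i in range(1,len(layers)):
--         for j in range(len(layers[i])):
--             if layers[i][j] == horizontal:
--                 if layers[i-1][j] in [vertical,top_left,top_right]:
--                     layers[i][j] = vertical
--
-- def construct_layers(s, layers, lay_num=0, i=0):
--     if lay_num == len(layers):
--         layers.append([horizontal] * len(s))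
--     layer = layers[lay_num]
--     while i<len(s):
--         if s[i] == vertical:
--             layer[i] = vertical
--         elif s[i] == top_left:
--             layer[i] = top_left
--             i = construct_layers(s, layers, lay_num + 1, i + 1)
--             layer[i] = top_right
--         elif s[i] == top_right:
--             return i
--         i+=1
-- ===== SOURCE B (Python) =====
-- bottom_left = '╰'
-- top_right = '╮'
-- horizontal = '─'
-- vertical = '│'
-- bottom_right = '╯'
-- top_left = '╭'
--
-- def process_one_block(s):
--     # One flat pass recording, per column, which glyph sits at which depth;
--     # each output row is then generated directly from that map (no recursion,
--     # no in-place layer correction).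
--     s = s.replace('.', '')
--     if s == '|':
--         return [vertical], [vertical]
--     if len(s) % 2 != 0:
--         raise Exception('Not even: ' + s)
--     s = s.replace('|', vertical)
--     s = s.replace('(', top_left)
--     s = s.replace(')', top_right)
--
--     n = len(s)
--     cols = [None] * n          # cols[j] = (glyph, depth) or None
--     depth = 0
--     rows = 1
--     j = 0
--     while j < n:
--         c = s[j]
--         if c == vertical:
--             cols[j] = (vertical, depth)
--         elif c == top_left:
--             cols[j] = (top_left, depth)
--             depth += 1
--             rows = max(rows, depth + 1)
--         elif c == top_right:
--             if depth == 0: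
--                 break          # nothing left to close: stop drawing
--             depth -= 1
--             cols[j] = (top_right, depth)
--         j += 1
--
--     layers = [''.join(
--         [(m[0] if m[1] == r else vertical if m[1] < r else horizontal)
--          if (m := cols[k]) is not None else horizontal
--          for k in range(n)]) for r in range(rows)]
--
--     hl = n // 2
--     bottom = [
--         vertical * (hl - i - 1) +
--         bottom_left +
--         horizontal * (2 * i) +
--         bottom_right +
--         vertical * (hl - i - 1)
--         for i in range(hl)
--     ]
--     return layers, bottom
-- ===== Notes on version B (the rewrite author's own statement) =====
-- stated objective: alternative
-- what changed: Replaces the recursive construct_layers over a mutable list-of-rows plus the correct_layers fix-up pass by a single flat scan with a depth counter that records one (glyph, depth) annotation per column, from which every output row is generated directly by a closed-form rule.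
import Mathlib
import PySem

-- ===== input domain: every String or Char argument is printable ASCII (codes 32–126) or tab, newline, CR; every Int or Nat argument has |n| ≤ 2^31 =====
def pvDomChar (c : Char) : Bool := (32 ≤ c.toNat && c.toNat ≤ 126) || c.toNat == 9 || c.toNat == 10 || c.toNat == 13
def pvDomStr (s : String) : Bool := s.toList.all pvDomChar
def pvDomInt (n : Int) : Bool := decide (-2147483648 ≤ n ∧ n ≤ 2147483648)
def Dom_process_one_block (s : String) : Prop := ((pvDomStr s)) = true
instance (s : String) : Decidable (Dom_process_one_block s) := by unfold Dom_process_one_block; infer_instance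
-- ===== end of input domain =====

set_option maxRecDepth 10000


-- B replaces A's recursive layer construction + in-place correction pass by one flat
-- depth-counting scan that annotates each column with (glyph, depth) and generates the
-- rows from that map by a closed-form rule; same return value on all of Pre_ (alternative
-- decomposition, no speed claim).  A mutates only its own local lists, so there are no
-- caller-visible side effects at stake.

-- shared by both ports: the three single-character str.replace calls, exact per character
def trChar (c : Char) : Char :=
  if c = '|' then '│' else if c = '(' then '╭' else if c = ')' then '╮' else c

-- ===== PORT A =====

-- layers[d][j] = c  (Python list-of-lists element assignment; indices in range on every reached state)
def setCell (L : List (List Char)) (d j : Nat) (c : Char) : List (List Char) :=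
  L.set d ((L.getD d []).set j c)

-- the while-loop of construct_layers; the recursive call's entry ('append a fresh row when
-- lay_num == len(layers)') is inlined in the '╭' branch; fuel t.length+1 is proved sufficient
-- below (positions strictly increase).  Result: some (layers, some j) = 'return i' at a '╮';
-- some (layers, none) = the loop ran off the end (Python returns None);
-- none = TypeError (an inner call returned None and 'layer[i] = top_right' was attempted).
def clLoop (t : List Char) : Nat → List (List Char) → Nat → Nat → Option (List (List Char) × Option Nat)
  | 0, _, _, _ => none
  | f+1, L, d, i =>
    if h : i < t.length then
      if t[i] = '│' then clLoop t f (setCell L d i '│') d (i+1)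
      else if t[i] = '╭' then
        let L1 := setCell L d i '╭'
        let L2 := if d + 1 = L1.length then L1 ++ [List.replicate t.length '─'] else L1
        match clLoop t f L2 (d+1) (i+1) with
        | none => none
        | some (_, none) => none      -- Python: i = None, then layer[None] raises TypeError (outside Pre_)
        | some (L', some j) => clLoop t f (setCell L' d j '╮') d (j+1)
      else if t[i] = '╮' then some (L, some i)
      else clLoop t f L d (i+1)
    else some (L, none)

-- inner j-loop of correct_layers (reads row i-1 of the already-updated state, as Python does)
def correctRow (prev cur : List Char) : List Char :=
  (List.range cur.length).map (fun j =>
    if cur.getD j ' ' = '─' ∧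
       (prev.getD j ' ' = '│' ∨ prev.getD j ' ' = '╭' ∨ prev.getD j ' ' = '╮')
    then '│' else cur.getD j ' ')

-- for i in range(1, len(layers)): mutate layers[i] in place
def correctA (L : List (List Char)) : List (List Char) :=
  (List.range' 1 (L.length - 1)).foldl
    (fun M i => M.set i (correctRow (M.getD (i-1) []) (M.getD i []))) L

def process_one_block (s : String) : List String × List String :=
  let cs := s.toList.filter (fun c => c ≠ '.')     -- s.replace('.', '') : drop every '.' (exact)
  if cs = ['|'] then (["│"], ["│"])
  else if cs.length % 2 ≠ 0 then ([], [])          -- Python: raise Exception('Not even: …') (outside Pre_)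
  else
    let t := cs.map trChar
    -- construct_layers(s, []): the first call always appends the fresh all-'─' row
    match clLoop t (t.length + 1) [List.replicate t.length '─'] 0 0 with
    | none => ([], [])                             -- Python: TypeError (outside Pre_)
    | some (L, _) =>                               -- the top-level return value is ignored by Python
      ((correctA L).map (fun l => String.ofList l),    -- ''.join over lists of single chars
       (List.range (t.length / 2)).map (fun i =>
         String.ofList (List.replicate (t.length / 2 - i - 1) '│' ++
           '╰' :: (List.replicate (2 * i) '─' ++
           '╯' :: List.replicate (t.length / 2 - i - 1) '│'))))

-- ===== PORT B =====

-- the single while-loop of B: cols[j] = (glyph, depth) annotations, row count, running depth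
def scanB (t : List Char) (i d : Nat) (C : List (Option (Char × Nat))) (R : Nat) :
    List (Option (Char × Nat)) × Nat :=
  if h : i < t.length then
    if t[i] = '│' then scanB t (i+1) d (C.set i (some ('│', d))) R
    else if t[i] = '╭' then scanB t (i+1) (d+1) (C.set i (some ('╭', d))) (max R (d+2))
    else if t[i] = '╮' then
      if d = 0 then (C, R)                         -- break: nothing left to close
      else scanB t (i+1) (d-1) (C.set i (some ('╮', d-1))) R
    else scanB t (i+1) d C R
  else (C, R)
termination_by t.length - i

-- the closed-form cell rule of B's row comprehension
def cellB (o : Option (Char × Nat)) (r : Nat) : Char :=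
  match o with
  | some (c, dp) => if dp = r then c else if dp < r then '│' else '─'
  | none => '─'

def process_one_block_alt (s : String) : List String × List String :=
  let cs := s.toList.filter (fun c => c ≠ '.')
  if cs = ['|'] then (["│"], ["│"])
  else if cs.length % 2 ≠ 0 then ([], [])          -- Python: raise Exception('Not even: …') (outside Pre_)
  else
    let t := cs.map trChar
    let p := scanB t 0 0 (List.replicate t.length none) 1
    ((List.range p.2).map (fun r => String.ofList (p.1.map (fun o => cellB o r))),
     (List.range (t.length / 2)).map (fun i =>
       String.ofList (List.replicate (t.length / 2 - i - 1) '│' ++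
         '╰' :: (List.replicate (2 * i) '─' ++
         '╯' :: List.replicate (t.length / 2 - i - 1) '│'))))

-- ===== PRECONDITION & SPEC =====

-- bracket balance of the '.'-stripped, glyph-translated string, truncated at the first
-- top-level closing bracket (the standard depth scan; true = A returns, false = A raises)
def balOk : List Char → Nat → Bool
  | [], d => d == 0
  | c :: r, d =>
    if c = '╭' then balOk r (d+1)
    else if c = '╮' then (if d = 0 then true else balOk r (d-1))
    else balOk r d

-- Pre_ excludes exactly the inputs where the Python A raises: an odd length after
-- '.'-removal (Exception), or an unmatched '(' before any top-level ')' (TypeError).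
def Pre_process_one_block (s : String) : Prop :=
  let cs := s.toList.filter (fun c => c ≠ '.')
  cs = ['|'] ∨ (cs.length % 2 = 0 ∧ balOk (cs.map trChar) 0 = true)
instance (s : String) : Decidable (Pre_process_one_block s) := by
  unfold Pre_process_one_block; infer_instance

def pvWitness_process_one_block : String := "()"

def Spec_process_one_block (s : String) (out : List String × List String) : Prop :=
  out = process_one_block_alt s
instance (s : String) (out : List String × List String) : Decidable (Spec_process_one_block s out) := by
  unfold Spec_process_one_block; infer_instance

-- ===== CLAIM (what is proved, stated in full; the proofs are below) =====
def Claim_equal_process_one_block : Prop :=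
  ∀ (s : String), Dom_process_one_block s → Pre_process_one_block s →
    Spec_process_one_block s (process_one_block s)

-- ===== LEMMAS AND PROOFS =====

-- proof-side vocabulary: the raw (uncorrected) cell a mark paints, and the two renderings
def cellRaw (o : Option (Char × Nat)) (r : Nat) : Char :=
  match o with
  | some (c, dp) => if dp = r then c else '─'
  | none => '─'

def renderRaw (C : List (Option (Char × Nat))) (R : Nat) : List (List Char) :=
  (List.range R).map (fun r => C.map (fun o => cellRaw o r))

def renderFin (C : List (Option (Char × Nat))) (R : Nat) : List (List Char) :=
  (List.range R).map (fun r => C.map (fun o => cellB o r))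

inductive ScOut where
  | fin : Nat → ScOut
  | brk : Nat → ScOut
deriving DecidableEq

-- B's scan with an explicit break floor fl and the reason the scan stopped
def scanF (t : List Char) (fl i d : Nat) (C : List (Option (Char × Nat))) (R : Nat) :
    List (Option (Char × Nat)) × Nat × ScOut :=
  if h : i < t.length then
    if t[i] = '│' then scanF t fl (i+1) d (C.set i (some ('│', d))) R
    else if t[i] = '╭' then scanF t fl (i+1) (d+1) (C.set i (some ('╭', d))) (max R (d+2))
    else if t[i] = '╮' then
      if d = fl then (C, R, ScOut.brk i)
      else scanF t fl (i+1) (d-1) (C.set i (some ('╮', d-1))) R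
    else scanF t fl (i+1) d C R
  else (C, R, ScOut.fin d)
termination_by t.length - i

def Fresh (C : List (Option (Char × Nat))) (i : Nat) : Prop :=
  ∀ j, i ≤ j → C.getD j none = none

def MBound (C : List (Option (Char × Nat))) (R : Nat) : Prop :=
  ∀ j c dp, C.getD j none = some (c, dp) → dp < R

def MChar (C : List (Option (Char × Nat))) : Prop :=
  ∀ j c dp, C.getD j none = some (c, dp) → c = '│' ∨ c = '╭' ∨ c = '╮'

theorem getD_set_self {α : Type} (C : List α) (i : Nat) (a d : α) (h : i < C.length) :
    (C.set i a).getD i d = a := by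
  simp [List.getD, h]

theorem getD_set_other {α : Type} (C : List α) (i j : Nat) (a d : α) (h : j ≠ i) :
    (C.set i a).getD j d = C.getD j d := by
  simp [List.getD, Ne.symm h]

theorem Fresh_set (C : List (Option (Char × Nat))) (i : Nat) (v : Option (Char × Nat))
    (h : Fresh C i) : Fresh (C.set i v) (i+1) := by
  intro j hj
  rw [getD_set_other C i j v none (by omega)]
  exact h j (by omega)

theorem MBound_set (C : List (Option (Char × Nat))) (R R' i : Nat) (c : Char) (dp : Nat)
    (h : MBound C R) (hR : R ≤ R') (hdp : dp < R') : MBound (C.set i (some (c, dp))) R' := by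
  intro j c' dp' hj
  by_cases hij : j = i
  · subst hij
    by_cases hlen : j < C.length
    · rw [getD_set_self C j _ none hlen] at hj
      cases hj; omega
    · rw [List.getD_eq_default] at hj
      · cases hj
      · simpa using hlen
  · rw [getD_set_other C i j _ none hij] at hj
    exact lt_of_lt_of_le (h j c' dp' hj) hR

theorem MChar_set (C : List (Option (Char × Nat))) (i : Nat) (c : Char) (dp : Nat)
    (h : MChar C) (hc : c = '│' ∨ c = '╭' ∨ c = '╮') : MChar (C.set i (some (c, dp))) := by
  intro j c' dp' hj
  by_cases hij : j = i
  · subst hij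
    by_cases hlen : j < C.length
    · rw [getD_set_self C j _ none hlen] at hj
      cases hj; exact hc
    · rw [List.getD_eq_default] at hj
      · cases hj
      · simpa using hlen
  · rw [getD_set_other C i j _ none hij] at hj
    exact h j c' dp' hj

theorem scanB_eq_scanF (t : List Char) : ∀ k i d C R, t.length - i ≤ k →
    scanB t i d C R = ((scanF t 0 i d C R).1, (scanF t 0 i d C R).2.1)
  | 0, i, d, C, R, hk => by
      have hi : ¬ i < t.length := by omega
      rw [scanB, scanF]; simp [hi]
  | k+1, i, d, C, R, hk => by
      by_cases hi : i < t.length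
      · rw [scanB, scanF]
        simp only [hi, dite_true]
        split_ifs with h1 h2 h3 h4 <;>
          first
            | exact scanB_eq_scanF t k _ _ _ _ (by omega)
            | rfl
      · rw [scanB, scanF]; simp [hi]

-- scan bookkeeping: lengths, freshness, bounds, glyph set, monotone row count, stop facts
theorem scanF_props (t : List Char) (fl : Nat) : ∀ k i d C R, t.length - i ≤ k →
    fl ≤ d → d < R → C.length = t.length → Fresh C i → MBound C R → MChar C →
    ((scanF t fl i d C R).1.length = t.length ∧
     R ≤ (scanF t fl i d C R).2.1 ∧
     MBound (scanF t fl i d C R).1 (scanF t fl i d C R).2.1 ∧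
     MChar (scanF t fl i d C R).1 ∧
     (∀ j, (scanF t fl i d C R).2.2 = ScOut.brk j →
        i ≤ j ∧ j < t.length ∧ t.getD j ' ' = '╮' ∧ Fresh (scanF t fl i d C R).1 j) ∧
     (∀ df, (scanF t fl i d C R).2.2 = ScOut.fin df → fl ≤ df))
  | 0, i, d, C, R, hk, h1, h2, h3, h4, h5, h6 => by
      have hi : ¬ i < t.length := by omega
      rw [scanF]; simp only [hi, dite_false]
      refine ⟨h3, le_refl _, h5, h6, ?_, ?_⟩
      · intro j hj; cases hj
      · intro df hdf; cases hdf; exact h1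
  | k+1, i, d, C, R, hk, h1, h2, h3, h4, h5, h6 => by
      by_cases hi : i < t.length
      · rw [scanF]
        simp only [hi, dite_true]
        split_ifs with c1 c2 c3 c4
        · -- '│'
          have ih := scanF_props t fl k (i+1) d (C.set i (some ('│', d))) R (by omega) h1 h2
            (by simpa using h3) (Fresh_set C i _ h4) (MBound_set C R R i _ d h5 le_rfl h2)
            (MChar_set C i _ d h6 (by decide))
          exact ⟨ih.1, ih.2.1, ih.2.2.1, ih.2.2.2.1,
            fun j hj => ⟨by have := (ih.2.2.2.2.1 j hj).1; omega, (ih.2.2.2.2.1 j hj).2.1,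
              (ih.2.2.2.2.1 j hj).2.2.1, (ih.2.2.2.2.1 j hj).2.2.2⟩, ih.2.2.2.2.2⟩
        · -- '╭'
          have ih := scanF_props t fl k (i+1) (d+1) (C.set i (some ('╭', d))) (max R (d+2))
            (by omega) (by omega) (by omega)
            (by simpa using h3) (Fresh_set C i _ h4)
            (MBound_set C R (max R (d+2)) i _ d h5 (le_max_left _ _) (by omega))
            (MChar_set C i _ d h6 (by decide))
          exact ⟨ih.1, le_trans (le_max_left _ _) ih.2.1, ih.2.2.1, ih.2.2.2.1,
            fun j hj => ⟨by have := (ih.2.2.2.2.1 j hj).1; omega, (ih.2.2.2.2.1 j hj).2.1,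
              (ih.2.2.2.2.1 j hj).2.2.1, (ih.2.2.2.2.1 j hj).2.2.2⟩, ih.2.2.2.2.2⟩
        · -- '╮' at the floor: break
          refine ⟨h3, le_refl _, h5, h6, ?_, ?_⟩
          · intro j hj
            cases hj
            exact ⟨le_refl _, hi, by rw [List.getD_eq_getElem _ _ hi]; exact c3, h4⟩
          · intro df hdf; cases hdf
        · -- '╮' above the floor
          have ih := scanF_props t fl k (i+1) (d-1) (C.set i (some ('╮', d-1))) R (by omega)
            (by omega) (by omega)
            (by simpa using h3) (Fresh_set C i _ h4)
            (MBound_set C R R i _ (d-1) h5 le_rfl (by omega))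
            (MChar_set C i _ (d-1) h6 (by decide))
          exact ⟨ih.1, ih.2.1, ih.2.2.1, ih.2.2.2.1,
            fun j hj => ⟨by have := (ih.2.2.2.2.1 j hj).1; omega, (ih.2.2.2.2.1 j hj).2.1,
              (ih.2.2.2.2.1 j hj).2.2.1, (ih.2.2.2.2.1 j hj).2.2.2⟩, ih.2.2.2.2.2⟩
        · -- other characters
          have ih := scanF_props t fl k (i+1) d C R (by omega) h1 h2 h3
            (fun j hj => h4 j (by omega)) h5 h6
          exact ⟨ih.1, ih.2.1, ih.2.2.1, ih.2.2.2.1,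
            fun j hj => ⟨by have := (ih.2.2.2.2.1 j hj).1; omega, (ih.2.2.2.2.1 j hj).2.1,
              (ih.2.2.2.2.1 j hj).2.2.1, (ih.2.2.2.2.1 j hj).2.2.2⟩, ih.2.2.2.2.2⟩
      · rw [scanF]; simp only [hi, dite_false]
        refine ⟨h3, le_refl _, h5, h6, ?_, ?_⟩
        · intro j hj; cases hj
        · intro df hdf; cases hdf; exact h1

-- peeling one nesting level off the floor
theorem scanF_comp (t : List Char) : ∀ k i d C R fl, t.length - i ≤ k → fl < d →
    scanF t fl i d C R =
      (match scanF t (fl+1) i d C R with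
       | (C', R', ScOut.brk j) => scanF t fl (j+1) fl (C'.set j (some ('╮', fl))) R'
       | z => z)
  | 0, i, d, C, R, fl, hk, hfl => by
      have hi : ¬ i < t.length := by omega
      conv_lhs => rw [scanF]
      conv_rhs => rw [scanF]
      simp [hi]
  | k+1, i, d, C, R, fl, hk, hfl => by
      by_cases hi : i < t.length
      · conv_lhs => rw [scanF]
        conv_rhs => rw [scanF]
        simp only [hi, dite_true]
        by_cases c1 : t[i] = '│'
        · rw [if_pos c1, if_pos c1]
          exact scanF_comp t k _ _ _ _ _ (by omega) (by omega)
        · rw [if_neg c1, if_neg c1]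
          by_cases c2 : t[i] = '╭'
          · rw [if_pos c2, if_pos c2]
            exact scanF_comp t k _ _ _ _ _ (by omega) (by omega)
          · rw [if_neg c2, if_neg c2]
            by_cases c3 : t[i] = '╮'
            · rw [if_pos c3, if_pos c3, if_neg (by omega : ¬ d = fl)]
              by_cases hd : d = fl + 1
              · subst hd
                rw [if_pos rfl]
                rfl
              · rw [if_neg hd]
                exact scanF_comp t k _ _ _ _ _ (by omega) (by omega)
            · rw [if_neg c3, if_neg c3]
              exact scanF_comp t k _ _ _ _ _ (by omega) hfl
      · conv_lhs => rw [scanF]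
        conv_rhs => rw [scanF]
        simp [hi]

theorem renderRaw_length (C : List (Option (Char × Nat))) (R : Nat) :
    (renderRaw C R).length = R := by
  simp [renderRaw]

theorem renderRaw_getD (C : List (Option (Char × Nat))) (R r : Nat) (hr : r < R) :
    (renderRaw C R).getD r [] = C.map (fun o => cellRaw o r) := by
  rw [List.getD_eq_getElem _ _ (by simpa [renderRaw] using hr)]
  simp [renderRaw]

theorem renderRaw_set (C : List (Option (Char × Nat))) (R j d : Nat) (c : Char)
    (hj : j < C.length) (hfresh : C.getD j none = none) (hd : d < R) :
    renderRaw (C.set j (some (c, d))) R = setCell (renderRaw C R) d j c := by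
  have hCj : C[j] = none := by
    rw [List.getD_eq_getElem _ _ hj] at hfresh; exact hfresh
  unfold setCell
  rw [renderRaw_getD C R d hd]
  apply List.ext_getElem
  · simp [renderRaw]
  · intro r hr1 hr2
    have hrR : r < R := by simpa [renderRaw] using hr1
    by_cases hrd : r = d
    · subst hrd
      simp [renderRaw, List.map_set, cellRaw]
    · simp only [renderRaw, List.getElem_map, List.getElem_range, List.getElem_set]
      rw [if_neg (by omega : ¬ d = r)]
      rw [List.map_set]
      have : cellRaw (some (c, d)) r = '─' := by simp [cellRaw, Ne.symm hrd]
      rw [this]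
      apply List.ext_getElem
      · simp
      · intro j' hj1 hj2
        simp only [List.getElem_set, List.getElem_map]
        split
        · next h => subst h; simp [hCj, cellRaw]
        · rfl

theorem renderRaw_append (C : List (Option (Char × Nat))) (R : Nat) (hb : MBound C R) :
    renderRaw C (R+1) = renderRaw C R ++ [List.replicate C.length '─'] := by
  unfold renderRaw
  rw [List.range_succ, List.map_append]
  congr 1
  simp only [List.map_cons, List.map_nil]
  congr 1
  apply List.ext_getElem
  · simp
  · intro j hj1 hj2
    have hjC : j < C.length := by simpa using hj2
    simp only [List.getElem_map, List.getElem_replicate]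
    rcases h : C[j] with _ | ⟨c, dp⟩
    · rfl
    · have hdp : dp < R := by
        apply hb j c dp
        rw [List.getD_eq_getElem _ _ hjC, h]
      simp only [cellRaw]
      rw [if_neg (by omega : ¬ dp = R)]

theorem renderRaw_replicate (n : Nat) :
    renderRaw (List.replicate n none) 1 = [List.replicate n '─'] := by
  simp [renderRaw, List.range_succ, cellRaw]

-- the main simulation: clLoop at depth/floor fl computes the raw rendering of scanF's marks
theorem clLoop_sim (t : List Char) : ∀ f fl i C R, t.length - i < f →
    fl < R → C.length = t.length → Fresh C i → MBound C R → MChar C →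
    clLoop t f (renderRaw C R) fl i =
      (match scanF t fl i fl C R with
       | (C', R', ScOut.brk j) => some (renderRaw C' R', some j)
       | (C', R', ScOut.fin df) => if df = fl then some (renderRaw C' R', none) else none)
  | 0, fl, i, C, R, hf, _, _, _, _, _ => by omega
  | f+1, fl, i, C, R, hf, hR, hlen, hfr, hb, hc => by
      by_cases hi : i < t.length
      · have hCi : C.getD i none = none := hfr i le_rfl
        have hCilen : i < C.length := by omega
        conv_lhs => rw [clLoop]
        conv_rhs => rw [scanF]
        simp only [hi, dite_true]
        by_cases c1 : t[i] = '│'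
        · simp only [if_pos c1]
          rw [← renderRaw_set C R i fl '│' hCilen hCi hR]
          exact clLoop_sim t f fl (i+1) (C.set i (some ('│', fl))) R (by omega) hR
            (by simpa using hlen) (Fresh_set C i _ hfr)
            (MBound_set C R R i _ fl hb le_rfl hR) (MChar_set C i _ fl hc (by decide))
        · simp only [if_neg c1]
          by_cases c2 : t[i] = '╭'
          · simp only [if_pos c2]
            have hset := renderRaw_set C R i fl '╭' hCilen hCi hR
            rw [← hset]
            set C1 := C.set i (some ('╭', fl)) with hC1
            set R1 := max R (fl+2) with hR1
            have hR1ge : fl + 2 ≤ R1 := hR1 ▸ le_max_right _ _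
            have hR1geR : R ≤ R1 := hR1 ▸ le_max_left _ _
            have hC1len : C1.length = t.length := by simp [hC1, hlen]
            have hC1fr : Fresh C1 (i+1) := Fresh_set C i _ hfr
            have hC1b : MBound C1 R1 := MBound_set C R R1 i _ fl hb hR1geR (by omega)
            have hC1bR : MBound C1 R := MBound_set C R R i _ fl hb le_rfl hR
            have hC1c : MChar C1 := MChar_set C i _ fl hc (by decide)
            have hstate : (if fl + 1 = (renderRaw C1 R).length
                  then renderRaw C1 R ++ [List.replicate t.length '─'] else renderRaw C1 R)
                = renderRaw C1 R1 := by
              rw [renderRaw_length]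
              by_cases hflR : fl + 1 = R
              · rw [if_pos hflR]
                have hmax : R1 = R + 1 := by
                  rw [hR1, Nat.max_eq_right (by omega)]; omega
                rw [hmax, renderRaw_append C1 R hC1bR, hC1len]
              · rw [if_neg hflR]
                have hmax : R1 = R := by
                  rw [hR1, Nat.max_eq_left (by omega)]
                rw [hmax]
            rw [hstate]
            have hflR1 : fl + 1 < R1 := by omega
            have ih := clLoop_sim t f (fl+1) (i+1) C1 R1 (by omega) hflR1 hC1len hC1fr hC1b hC1c
            have props := scanF_props t (fl+1) t.length (i+1) (fl+1) C1 R1 (by omega)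
              le_rfl hflR1 hC1len hC1fr hC1b hC1c
            have hcomp := scanF_comp t t.length (i+1) (fl+1) C1 R1 fl (by omega) (by omega)
            rw [hcomp]
            rcases hz : scanF t (fl+1) (i+1) (fl+1) C1 R1 with ⟨C1', R1', o1⟩
            rw [hz] at ih props
            dsimp only at props
            rcases o1 with df | j
            · -- the inner loop ran off the end (TypeError) : propagate none
              dsimp only
              have hdf : fl + 1 ≤ df := props.2.2.2.2.2 df rfl
              dsimp only at ih
              rw [ih]
              by_cases hdfe : df = fl + 1
              · rw [if_pos hdfe]
                dsimp only
                rw [if_neg (by omega : ¬ df = fl)]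
              · rw [if_neg hdfe]
                dsimp only
                rw [if_neg (by omega : ¬ df = fl)]
            · -- the inner loop returned j at a '╮': write it and continue at this level
              dsimp only
              dsimp only at ih
              rw [ih]
              dsimp only
              obtain ⟨hij, hjlen, _, hfr2⟩ := props.2.2.2.2.1 j rfl
              have hC1'len := props.1
              have hC1'j : C1'.getD j none = none := hfr2 j le_rfl
              have hflR1' : fl < R1' := by have := props.2.1; omega
              have hset2 := renderRaw_set C1' R1' j fl '╮' (by omega) hC1'j hflR1'
              rw [← hset2]
              exact clLoop_sim t f fl (j+1) (C1'.set j (some ('╮', fl))) R1' (by omega) hflR1'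
                (by simpa using hC1'len) (Fresh_set C1' j _ hfr2)
                (MBound_set C1' R1' R1' j _ fl props.2.2.1 le_rfl hflR1')
                (MChar_set C1' j _ fl props.2.2.2.1 (by decide))
          · simp only [if_neg c2]
            by_cases c3 : t[i] = '╮'
            · simp only [if_pos c3]
              rfl
            · simp only [if_neg c3]
              exact clLoop_sim t f fl (i+1) C R (by omega) hR hlen
                (fun j hj => hfr j (by omega)) hb hc
      · rw [clLoop]
        conv_rhs => rw [scanF]
        simp [hi]
  termination_by f => f

-- balOk reads off scanF's stopping reason at floor 0
theorem balOk_scanF (t : List Char) : ∀ k i d C R, t.length - i ≤ k →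
    balOk (t.drop i) d =
      (match (scanF t 0 i d C R).2.2 with
       | ScOut.brk _ => true
       | ScOut.fin df => df == 0)
  | 0, i, d, C, R, hk => by
      have hi : ¬ i < t.length := by omega
      rw [scanF, List.drop_eq_nil_of_le (by omega)]
      simp [hi, balOk]
  | k+1, i, d, C, R, hk => by
      by_cases hi : i < t.length
      · have hdrop : t.drop i = t[i] :: t.drop (i+1) := (List.getElem_cons_drop hi).symm
        conv_rhs => rw [scanF]
        rw [hdrop, balOk]
        simp only [hi, dite_true]
        by_cases c1 : t[i] = '│'
        · have c2 : ¬ t[i] = '╭' := by rw [c1]; decide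
          have c3 : ¬ t[i] = '╮' := by rw [c1]; decide
          simp only [if_pos c1, if_neg c2, if_neg c3]
          exact balOk_scanF t k (i+1) d _ R (by omega)
        · simp only [if_neg c1]
          by_cases c2 : t[i] = '╭'
          · simp only [if_pos c2]
            exact balOk_scanF t k (i+1) (d+1) _ _ (by omega)
          · simp only [if_neg c2]
            by_cases c3 : t[i] = '╮'
            · simp only [if_pos c3]
              by_cases hd : d = 0
              · simp only [if_pos hd]
              · simp only [if_neg hd]
                exact balOk_scanF t k (i+1) (d-1) _ R (by omega)
            · simp only [if_neg c3]
              exact balOk_scanF t k (i+1) d C R (by omega)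
      · rw [scanF, List.drop_eq_nil_of_le (by omega)]
        simp [hi, balOk]

theorem cellB_zero (o : Option (Char × Nat)) : cellB o 0 = cellRaw o 0 := by
  rcases o with _ | ⟨c, dp⟩ <;> simp [cellB, cellRaw]

-- one correction step: row k is already final, it fixes raw row k+1 into final row k+1
theorem correctRow_step (C : List (Option (Char × Nat))) (k : Nat) (hc : MChar C) :
    correctRow (C.map (fun o => cellB o k)) (C.map (fun o => cellRaw o (k+1)))
      = C.map (fun o => cellB o (k+1)) := by
  unfold correctRow
  apply List.ext_getElem
  · simp
  · intro j hj1 hj2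
    have hjC : j < C.length := by simpa using hj2
    simp only [List.getElem_map, List.getElem_range, List.length_map]
    rw [List.getD_eq_getElem _ _ (by simpa using hjC), List.getD_eq_getElem _ _ (by simpa using hjC)]
    simp only [List.getElem_map]
    rcases h : C[j] with _ | ⟨c, dp⟩
    · simp [cellRaw, cellB]
    · have hcset : c = '│' ∨ c = '╭' ∨ c = '╮' := by
        apply hc j c dp
        rw [List.getD_eq_getElem _ _ hjC, h]
      have hcne : c ≠ '─' := by rcases hcset with h' | h' | h' <;> subst h' <;> decide
      by_cases h1 : dp = k + 1
      · have e1 : cellRaw (some (c, dp)) (k+1) = c := by simp [cellRaw, h1]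
        have e3 : cellB (some (c, dp)) (k+1) = c := by simp [cellB, h1]
        rw [e1, e3, if_neg]
        intro hx
        exact hcne hx.1
      · have e1 : cellRaw (some (c, dp)) (k+1) = '─' := by simp [cellRaw, h1]
        by_cases h2 : dp < k + 1
        · have e2 : cellB (some (c, dp)) k = (if dp = k then c else '│') := by
            by_cases hk2 : dp = k
            · simp [cellB, hk2]
            · simp [cellB, hk2, show dp < k by omega]
          have e3 : cellB (some (c, dp)) (k+1) = '│' := by simp [cellB, h1, h2]
          rw [e1, e2, e3, if_pos]
          refine ⟨rfl, ?_⟩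
          by_cases hk2 : dp = k
          · rw [if_pos hk2]
            exact hcset
          · rw [if_neg hk2]
            left
            rfl
        · have e2 : cellB (some (c, dp)) k = '─' := by
            simp [cellB, show ¬ dp = k by omega, show ¬ dp < k by omega]
          have e3 : cellB (some (c, dp)) (k+1) = '─' := by simp [cellB, h1, h2]
          rw [e1, e2, e3, if_neg]
          rintro ⟨-, hx | hx | hx⟩ <;> exact absurd hx (by decide)

def mixR (C : List (Option (Char × Nat))) (R k : Nat) : List (List Char) :=
  (List.range R).map (fun r =>
    if r ≤ k then C.map (fun o => cellB o r) else C.map (fun o => cellRaw o r))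

theorem mixR_zero (C : List (Option (Char × Nat))) (R : Nat) :
    mixR C R 0 = renderRaw C R := by
  unfold mixR renderRaw
  apply List.map_congr_left
  intro r _
  by_cases h : r ≤ 0
  · have : r = 0 := by omega
    subst this
    simp [cellB_zero]
  · rw [if_neg h]

theorem mixR_getD (C : List (Option (Char × Nat))) (R k r : Nat) (hr : r < R) :
    (mixR C R k).getD r [] =
      (if r ≤ k then C.map (fun o => cellB o r) else C.map (fun o => cellRaw o r)) := by
  rw [List.getD_eq_getElem _ _ (by simpa [mixR] using hr)]
  simp [mixR]

theorem mixR_step (C : List (Option (Char × Nat))) (R k : Nat) (hk : k + 1 < R)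
    (hc : MChar C) :
    (mixR C R k).set (k+1)
        (correctRow ((mixR C R k).getD k []) ((mixR C R k).getD (k+1) []))
      = mixR C R (k+1) := by
  rw [mixR_getD C R k k (by omega), mixR_getD C R k (k+1) (by omega)]
  rw [if_pos le_rfl, if_neg (by omega)]
  rw [correctRow_step C k hc]
  apply List.ext_getElem
  · simp [mixR]
  · intro r hr1 hr2
    have hrR : r < R := by simpa [mixR] using hr2
    simp only [mixR, List.getElem_set, List.getElem_map, List.getElem_range]
    by_cases h : k + 1 = r
    · subst h
      rw [if_pos rfl, if_pos le_rfl]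
    · rw [if_neg h]
      by_cases h2 : r ≤ k
      · rw [if_pos h2, if_pos (by omega)]
      · rw [if_neg h2, if_neg (by omega)]

theorem correctA_fold (C : List (Option (Char × Nat))) (R : Nat) (hc : MChar C) :
    ∀ k, k ≤ R - 1 →
    (List.range' 1 k).foldl
        (fun M i => M.set i (correctRow (M.getD (i-1) []) (M.getD i []))) (renderRaw C R)
      = mixR C R k
  | 0, _ => by simp [mixR_zero]
  | k+1, hk => by
      have hrange : List.range' 1 (k+1) = List.range' 1 k ++ [k+1] := by
        simp [List.range'_concat, Nat.add_comm]
      rw [hrange, List.foldl_append, correctA_fold C R hc k (by omega)]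
      simp only [List.foldl_cons, List.foldl_nil, Nat.add_sub_cancel]
      exact mixR_step C R k (by omega) hc

theorem mixR_full (C : List (Option (Char × Nat))) (R : Nat) :
    mixR C R (R - 1) = renderFin C R := by
  unfold mixR renderFin
  apply List.map_congr_left
  intro r hr
  rw [if_pos (by simp at hr; omega)]

-- the in-place correction turns the raw rendering into the closed-form one
theorem correctA_renderRaw (C : List (Option (Char × Nat))) (R : Nat)
    (hc : MChar C) (hR : 1 ≤ R) :
    correctA (renderRaw C R) = renderFin C R := by
  unfold correctA
  rw [renderRaw_length]
  rw [correctA_fold C R hc (R-1) le_rfl, mixR_full]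

theorem Fresh_replicate (n : Nat) : Fresh (List.replicate n none) 0 := by
  intro j _
  by_cases h : j < n
  · rw [List.getD_eq_getElem _ _ (by simpa using h)]; simp
  · rw [List.getD_eq_default]; simpa using h

theorem MBound_replicate (n R : Nat) : MBound (List.replicate n none) R := by
  intro j c dp h
  by_cases hj : j < n
  · rw [List.getD_eq_getElem _ _ (by simpa using hj)] at h; simp at h
  · rw [List.getD_eq_default _ _ (by simpa using hj)] at h; cases h

theorem MChar_replicate (n : Nat) : MChar (List.replicate n none) := by
  intro j c dp h
  by_cases hj : j < n
  · rw [List.getD_eq_getElem _ _ (by simpa using hj)] at h; simp at h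
  · rw [List.getD_eq_default _ _ (by simpa using hj)] at h; cases h

-- ===== VERDICT (by name: the statement is the Claim_ definition above) =====
theorem process_one_block_spec : Claim_equal_process_one_block := by
  intro s _ hpre
  unfold Spec_process_one_block process_one_block process_one_block_alt
  dsimp only
  unfold Pre_process_one_block at hpre
  dsimp only at hpre
  by_cases hbar : s.toList.filter (fun c => c ≠ '.') = ['|']
  · rw [if_pos hbar, if_pos hbar]
  · rw [if_neg hbar, if_neg hbar]
    rcases hpre with h | ⟨heven, hbal⟩
    · exact absurd h hbar
    · rw [if_neg (by omega : ¬ (s.toList.filter (fun c => c ≠ '.')).length % 2 ≠ 0),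
          if_neg (by omega : ¬ (s.toList.filter (fun c => c ≠ '.')).length % 2 ≠ 0)]
      set t := (s.toList.filter (fun c => c ≠ '.')).map trChar with ht
      set C0 := List.replicate t.length (none : Option (Char × Nat)) with hC0
      have hC0len : C0.length = t.length := by simp [hC0]
      have key := clLoop_sim t (t.length + 1) 0 0 C0 1 (by omega) (by omega) hC0len
        (Fresh_replicate _) (MBound_replicate _ _) (MChar_replicate _)
      have props := scanF_props t 0 t.length 0 0 C0 1 (by omega) le_rfl (by omega) hC0len
        (Fresh_replicate _) (MBound_replicate _ _) (MChar_replicate _)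
      have hbal2 := balOk_scanF t t.length 0 0 C0 1 (by omega)
      rw [List.drop_zero] at hbal2
      have hscanB := scanB_eq_scanF t t.length 0 0 C0 1 (by omega)
      rw [renderRaw_replicate t.length] at key
      rcases hsc : scanF t 0 0 0 C0 1 with ⟨C', R', o⟩
      rw [hsc] at key props hbal2 hscanB
      dsimp only at key props hbal2 hscanB
      have hlayers : correctA (renderRaw C' R') = renderFin C' R' :=
        correctA_renderRaw C' R' props.2.2.2.1 props.2.1
      rcases o with df | j
      · -- the scan ran off the end; balance forces df = 0
        have hdf : df = 0 := by
          rw [hbal2] at hbal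
          simpa using hbal
        subst hdf
        dsimp only at key
        rw [if_pos rfl] at key
        rw [key]
        dsimp only
        simp [hscanB, hlayers, renderFin, List.map_map, Function.comp]
      · -- the scan broke at a top-level '╮'
        dsimp only at key
        rw [key]
        dsimp only
        simp [hscanB, hlayers, renderFin, List.map_map, Function.comp]
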